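-- pv_equiv track=rewrite | github.com/Akeneus/sequence-assembler | substitution.py | _check_sequence_subst
-- ===== SOURCE A (Python) =====
-- import math
--
-- def _check_sequence_subst(sequence_to_check:str, sequence_getting_checked:str) -> int:
--     """
--     _checkSequenceSubst checks of a sequence is a prefix of another, considering the edit distance and the max fehler quota
--
--     :param sequence_to_check:
--     :param sequence_getting_checked:
--     :return: the size of the matching prefixstring
--     """
--     sequence_to_check_len = len(sequence_to_check)
--     sequence_getting_checked_len = len(sequence_getting_checked)
--     v = 0
--     max_error_quoat = _get_max_error_quota(max(sequence_to_check_len,sequence_getting_checked_len))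
--     for i in range(sequence_to_check_len):
--         current_subsequence = sequence_to_check[i:sequence_to_check_len]
--         edit_dist = _get_edit_distanze(sequence_getting_checked, current_subsequence)
--         if(edit_dist <= max_error_quoat):
--             return len(current_subsequence)
--     return v
--
-- def _get_max_error_quota(stringLen:int) -> int:
--     """
--     _getMaxErrors calculates the max errors, which a sequence is allowed to have,
--     since it is allowed to have 1 error in every 10 chars of a sequence
--
--     :param stringLen: the length of the sequence
--     :return: the max number of errors
--     """
--     return math.ceil(stringLen / 10)
--
-- def _get_edit_distanze(sequence_getting_check, sequence_to_check):
--     """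
--     _getEditDistanze uses a simple for loop to calculate the edit distance between two strings (only substitution!)
--
--     :param sequence_getting_check:
--     :param sequence_to_check:
--     :return: the edit distanz between two Sequences
--     """
--     edit_dist = 0
--     relevant_subsequence = sequence_getting_check[0:len(sequence_to_check)]
--     for i in range(len(relevant_subsequence)):
--         if(relevant_subsequence[i] != sequence_to_check[i]):
--             edit_dist += 1
--     return edit_dist
-- ===== SOURCE B (Python) =====
-- def _check_sequence_subst(sequence_to_check: str, sequence_getting_checked: str) -> int:
--     """Cross-correlation reformulation: bucket the positions of sequence_getting_checked
--     by character, accumulate per-offset aligned-match counts into one table in a single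
--     pass over sequence_to_check (only visiting equal-character pairs), then return the
--     length for the first offset whose mismatch count is within the error quota."""
--     n1 = len(sequence_to_check)
--     n2 = len(sequence_getting_checked)
--     quota = -(-max(n1, n2) // 10)  # == math.ceil(max(n1, n2) / 10)
--     positions = {}
--     for q, ch in enumerate(sequence_getting_checked):
--         positions[ch] = positions.get(ch, []) + [q]
--     matches = [0] * (n1 + 1)
--     for p, ch in enumerate(sequence_to_check):
--         for q in positions.get(ch, []):
--             if q <= p:
--                 matches[p - q] += 1
--     for i in range(n1):
--         overlap = min(n1 - i, n2)
--         if overlap - matches[i] <= quota: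
--             return n1 - i
--     return 0
-- ===== Notes on version B (the rewrite author's own statement) =====
-- stated objective: alternative
-- what changed: B replaces A's per-suffix edit-distance scans by a character-bucketed cross-correlation: it groups the positions of sequence_getting_checked by character, accumulates aligned-match counts for all offsets into one table in a single pass over sequence_to_check (visiting only equal-character pairs), and then picks the first offset whose mismatch count (overlap minus matches) is within the quota.
import Mathlib
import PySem

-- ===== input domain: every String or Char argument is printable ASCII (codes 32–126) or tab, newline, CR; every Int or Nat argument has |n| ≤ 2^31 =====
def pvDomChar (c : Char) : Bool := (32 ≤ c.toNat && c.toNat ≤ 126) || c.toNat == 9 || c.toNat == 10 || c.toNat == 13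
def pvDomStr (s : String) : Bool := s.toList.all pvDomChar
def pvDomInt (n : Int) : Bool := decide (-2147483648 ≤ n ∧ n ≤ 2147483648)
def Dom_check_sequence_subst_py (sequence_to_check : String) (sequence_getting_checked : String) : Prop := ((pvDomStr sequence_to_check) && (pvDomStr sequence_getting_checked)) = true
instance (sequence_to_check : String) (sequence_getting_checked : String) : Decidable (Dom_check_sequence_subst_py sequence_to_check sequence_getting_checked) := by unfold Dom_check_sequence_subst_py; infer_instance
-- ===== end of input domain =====

-- B replaces A's per-suffix mismatch scans by one character-bucketed cross-correlation table of match counts; same result, no speed claim.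
-- ===== PORT A =====

-- math.ceil(stringLen / 10): exact ceiling division (the float division is exact for every length below 2^52)
def pvA_quota (stringLen : Int) : Int := -(PySem.Int.floordiv (-stringLen) 10)

-- _get_edit_distanze: slice the prefix, then count index-by-index mismatches over range(len(relevant))
def pvA_edit (sequence_getting_check sequence_to_check : List Char) : Int :=
  let relevant := PySem.List.slice sequence_getting_check (some 0) (some (sequence_to_check.length : Int))
  (PySem.List.pyRange 0 (relevant.length : Int) 1).foldl
    (fun ed i =>
      if PySem.List.pyGetD relevant i ' ' ≠ PySem.List.pyGetD sequence_to_check i ' ' then ed + 1 else ed)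
    0

-- the for-loop over range(sequence_to_check_len) with an early return
def pvA_loop (s1 s2 : List Char) (q : Int) : List Int → Int
  | [] => 0                                   -- return v
  | i :: rest =>
    let current_subsequence := PySem.List.slice s1 (some i) (some (s1.length : Int))
    if pvA_edit s2 current_subsequence ≤ q then (current_subsequence.length : Int)
    else pvA_loop s1 s2 q rest

def check_sequence_subst_py (sequence_to_check : String) (sequence_getting_checked : String) : Int :=
  let s1 := sequence_to_check.toList
  let s2 := sequence_getting_checked.toList
  let max_error_quoat := pvA_quota (max (s1.length : Int) (s2.length : Int))
  pvA_loop s1 s2 max_error_quoat (PySem.List.pyRange 0 (s1.length : Int) 1)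

-- ===== PORT B =====

-- positions[ch] = positions.get(ch, []) + [q]  over enumerate(sequence_getting_checked)
def pvB_positions (l2 : List Char) : PySem.Dict Char (List Int) :=
  (PySem.List.enumerate l2 0).foldl (fun d e => d.modify e.2 [] (· ++ [e.1])) PySem.Dict.empty

-- mtab[i] += 1; Python raises IndexError out of range, which is unreachable here (0 ≤ p-q ≤ p < len mtab)
def pvB_inc (m : List Int) (i : Int) : List Int :=
  if 0 ≤ i then m.set i.toNat (m.getD i.toNat 0 + 1) else m

-- the double loop accumulating the per-offset match table
def pvB_matches (l1 : List Char) (pos : PySem.Dict Char (List Int)) (init : List Int) : List Int :=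
  (PySem.List.enumerate l1 0).foldl
    (fun m e => (pos.getD e.2 []).foldl (fun m q => if q ≤ e.1 then pvB_inc m (e.1 - q) else m) m)
    init

-- the final for over range(n1) with an early return; mtab[i] is always in range (i < n1 < len mtab)
def pvB_find (mtab : List Int) (n1 n2 quota : Int) : List Int → Int
  | [] => 0
  | i :: rest =>
    if min (n1 - i) n2 - PySem.List.pyGetD mtab i 0 ≤ quota then n1 - i
    else pvB_find mtab n1 n2 quota rest

def check_sequence_subst_py_alt (sequence_to_check : String) (sequence_getting_checked : String) : Int :=
  let l1 := sequence_to_check.toList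
  let l2 := sequence_getting_checked.toList
  let n1 : Int := (l1.length : Int)
  let n2 : Int := (l2.length : Int)
  let quota := -(PySem.Int.floordiv (-(max n1 n2)) 10)
  let pos := pvB_positions l2
  let mtab := pvB_matches l1 pos (PySem.List.pyRepeat [(0 : Int)] (n1 + 1))
  pvB_find mtab n1 n2 quota (PySem.List.pyRange 0 n1 1)

-- ===== PRECONDITION & SPEC =====
def Spec_check_sequence_subst_py (sequence_to_check : String) (sequence_getting_checked : String) (out : Int) : Prop := out = check_sequence_subst_py_alt sequence_to_check sequence_getting_checked
instance (sequence_to_check : String) (sequence_getting_checked : String) (out : Int) : Decidable (Spec_check_sequence_subst_py sequence_to_check sequence_getting_checked out) := by unfold Spec_check_sequence_subst_py; infer_instance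

-- ===== CLAIM (what is proved, stated in full; the proofs are below) =====
def Claim_equal_check_sequence_subst_py : Prop := ∀ (sequence_to_check : String) (sequence_getting_checked : String), Dom_check_sequence_subst_py sequence_to_check sequence_getting_checked → Spec_check_sequence_subst_py sequence_to_check sequence_getting_checked (check_sequence_subst_py sequence_to_check sequence_getting_checked)

-- ===== LEMMAS AND PROOFS =====


-- the number of aligned equal characters between l1[k:] and l2, as an Int (the common yardstick)
def pvMatchZ (l1 l2 : List Char) (k : Nat) : Int :=
  (((l1.drop k).zip l2).countP (fun ab => ab.2 == ab.1) : Int)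

-- A's edit-distance fold counts the aligned UNEQUAL characters
lemma pvA_fold_eq (r u : List Char) (hru : r.length ≤ u.length) (a : Nat) (e : Int) :
      (PySem.List.pyRange (a : Int) (r.length : Int) 1).foldl
        (fun ed i => if PySem.List.pyGetD r i ' ' ≠ PySem.List.pyGetD u i ' ' then ed + 1 else ed)
        e
      = e + (((u.drop a).zip (r.drop a)).countP (fun ab => !(ab.2 == ab.1)) : Int) := by
  by_cases ha : r.length ≤ a
  · rw [PySem.List.pyRange_one_eq_nil (by exact_mod_cast ha)]
    rw [List.drop_eq_nil_of_le ha, List.zip_nil_right]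
    simp
  · push_neg at ha
    rw [PySem.List.pyRange_one_cons (by exact_mod_cast ha)]
    have hau : a < u.length := lt_of_lt_of_le ha hru
    rw [List.drop_eq_getElem_cons ha, List.drop_eq_getElem_cons hau]
    simp only [List.zip_cons_cons, List.foldl_cons, PySem.List.pyGetD_natCast, List.countP_cons]
    rw [List.getD_eq_getElem r ' ' ha, List.getD_eq_getElem u ' ' hau]
    have hrec := fun e' => pvA_fold_eq r u hru (a + 1) e'
    by_cases hne : r[a] = u[a]
    · have h1 : ¬(r[a] ≠ u[a]) := by simp [hne]
      rw [if_neg h1]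
      have : (r[a] == u[a]) = true := by simp [hne]
      rw [show ((a : Int) + 1) = ((a + 1 : Nat) : Int) by push_cast; ring, hrec e]
      simp [this]
    · rw [if_pos hne]
      have : (r[a] == u[a]) = false := by simp [hne]
      rw [show ((a : Int) + 1) = ((a + 1 : Nat) : Int) by push_cast; ring, hrec (e + 1)]
      simp [this]; ring
termination_by r.length - a
decreasing_by omega

-- the zipped pair list does not see past u's length (shape-specific helper)
lemma pv_zip_take (u v : List Char) : u.zip (v.take u.length) = u.zip v := by
  induction u generalizing v with
  | nil => simp
  | cons a t ih =>
    cases v with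
    | nil => simp
    | cons b w => simp [ih]

lemma pvA_edit_eq (u v : List Char) :
    pvA_edit v u = ((u.zip v).countP (fun ab => !(ab.2 == ab.1)) : Int) := by
  unfold pvA_edit
  rw [PySem.List.slice_zero_start, PySem.List.slice_to_natCast]
  have hlen : (v.take u.length).length ≤ u.length := by simp
  have := pvA_fold_eq (v.take u.length) u hlen 0 0
  simp only [Nat.cast_zero, List.drop_zero] at this
  rw [this, pv_zip_take]
  simp

-- equal + unequal = overlap
lemma pv_count_split (z : List (Char × Char)) :
    (z.countP (fun ab => !(ab.2 == ab.1)) : Int) = (z.length : Int) - (z.countP (fun ab => ab.2 == ab.1) : Int) := by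
  have h := List.length_eq_countP_add_countP (fun ab : Char × Char => ab.2 == ab.1) (l := z)
  simp only [] at h
  have hc : z.countP (fun ab => !(ab.2 == ab.1))
      = z.countP (fun a : Char × Char => decide ¬((a.2 == a.1) = true)) := by
    apply List.countP_congr
    intro a _
    cases hab : (a.2 == a.1) <;> simp [hab]
  rw [hc]
  omega

-- folding keyed on the second component is folding the swapped pairs keyed on the first
lemma pv_foldl_swap (L : List (Int × Char)) (d : PySem.Dict Char (List Int)) :
    L.foldl (fun d e => d.modify e.2 [] (· ++ [e.1])) d
      = (L.map Prod.swap).foldl (fun d p => d.modify p.1 [] (· ++ [p.2])) d := by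
  induction L generalizing d with
  | nil => rfl
  | cons e L ih => simp only [List.foldl_cons, List.map_cons]; exact ih _

-- the positions dict groups the indices of l2 by character
lemma pvB_positions_getD (l2 : List Char) (ch : Char) :
    (pvB_positions l2).getD ch [] =
      ((PySem.List.enumerate l2 0).filter (fun e => e.2 == ch)).map (fun e => e.1) := by
  unfold pvB_positions
  rw [pv_foldl_swap (PySem.List.enumerate l2 0) PySem.Dict.empty]
  rw [PySem.Dict.getD_foldl_modify_append]
  simp [PySem.Dict.getD_empty, List.filter_map, List.map_map, Function.comp_def, Prod.swap]

lemma pvB_inc_length (m : List Int) (j : Int) : (pvB_inc m j).length = m.length := by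
  unfold pvB_inc; split <;> simp

lemma pvB_inc_getD (m : List Int) (j : Int) (i : Nat) (h : i < m.length) :
    (pvB_inc m j).getD i 0 = m.getD i 0 + if j = (i : Int) then 1 else 0 := by
  unfold pvB_inc
  by_cases hj : j = (i : Int)
  · subst hj
    rw [if_pos (by positivity)]
    simp [List.getD_eq_getElem?_getD, List.getElem?_set, h, List.getElem?_eq_getElem h]
  · rw [if_neg hj]
    by_cases hnn : (0:Int) ≤ j
    · rw [if_pos hnn]
      have hne : j.toNat ≠ i := by omega
      simp [List.getD_eq_getElem?_getD, List.getElem?_set, hne]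
    · rw [if_neg hnn]; simp

lemma pvB_inner_len (p : Int) (Q : List Int) (m : List Int) :
    (Q.foldl (fun m q => if q ≤ p then pvB_inc m (p - q) else m) m).length = m.length := by
  induction Q generalizing m with
  | nil => rfl
  | cons q Q ih =>
    simp only [List.foldl_cons]
    rw [ih]
    by_cases hq : q ≤ p <;> simp [hq, pvB_inc_length]

lemma pvB_inner_getD (p : Int) (Q : List Int) (m : List Int) (i : Nat) (h : i < m.length) :
    (Q.foldl (fun m q => if q ≤ p then pvB_inc m (p - q) else m) m).getD i 0
      = m.getD i 0 + (Q.countP (fun q => decide (q ≤ p) && decide (p - q = (i:Int))) : Int) := by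
  induction Q generalizing m with
  | nil => simp
  | cons q Q ih =>
    simp only [List.foldl_cons, List.countP_cons]
    by_cases hq : q ≤ p
    · rw [if_pos hq, ih _ (by rw [pvB_inc_length]; exact h), pvB_inc_getD m _ i h]
      by_cases he : p - q = (i:Int) <;> simp [hq, he] <;> push_cast <;> ring
    · rw [if_neg hq, ih m h]; simp [hq]

-- the outer fold: entry i accumulates the per-position counts
lemma pvB_mtab_sum (pos : PySem.Dict Char (List Int)) (i : Nat) (xs : List Char) :
    ∀ (s : Int) (m : List Int), i < m.length →
    ((PySem.List.enumerate xs s).foldl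
        (fun m e => (pos.getD e.2 []).foldl (fun m q => if q ≤ e.1 then pvB_inc m (e.1 - q) else m) m) m).getD i 0
      = m.getD i 0 + ((PySem.List.enumerate xs s).map
          (fun e => ((pos.getD e.2 []).countP (fun q => decide (q ≤ e.1) && decide (e.1 - q = (i:Int))) : Int))).sum := by
  induction xs with
  | nil => intro s m h; simp [PySem.List.enumerate_nil]
  | cons c xs ih =>
    intro s m h
    rw [PySem.List.enumerate_cons]
    simp only [List.foldl_cons, List.map_cons, List.sum_cons]
    rw [ih (s+1) _ (by rw [pvB_inner_len]; exact h), pvB_inner_getD _ _ _ _ h]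
    ring

-- an enumeration contains exactly one pair with a given index
lemma pv_enum_countP_index (f : Char → Bool) (j : Int) (v : List Char) :
    ∀ (s : Int), (PySem.List.enumerate v s).countP (fun e => decide (e.1 = j) && f e.2)
      = if 0 ≤ j - s ∧ (j - s).toNat < v.length then (if f (v.getD (j - s).toNat ' ') then 1 else 0) else 0 := by
  induction v with
  | nil => intro s; simp [PySem.List.enumerate_nil]
  | cons c v ih =>
    intro s
    rw [PySem.List.enumerate_cons, List.countP_cons]
    by_cases hs : s = j
    · subst hs
      have htail : (PySem.List.enumerate v (s+1)).countP (fun e => decide (e.1 = s) && f e.2) = 0 := by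
        rw [List.countP_eq_zero]
        intro e he
        rcases (PySem.List.mem_enumerate_iff _ _ _).1 he with ⟨k, hk, rfl⟩
        simp only [Bool.and_eq_true, decide_eq_true_eq]
        intro h
        omega
      rw [htail]
      have h00 : s - s = 0 := by ring
      simp [h00]
    · have hd : (decide (s = j) && f c) = false := by simp [hs]
      rw [hd, ih (s+1)]
      simp only [Bool.false_eq_true, if_false, zero_add]
      by_cases h2 : 0 ≤ j - (s+1) ∧ (j - (s+1)).toNat < v.length
      · rw [if_pos h2, if_pos (show 0 ≤ j - s ∧ (j - s).toNat < (c :: v).length by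
          simp only [List.length_cons]; omega)]
        have hstep : (j - s).toNat = (j - (s+1)).toNat + 1 := by omega
        rw [hstep]
        simp
      · rw [if_neg h2, if_neg (show ¬ (0 ≤ j - s ∧ (j - s).toNat < (c :: v).length) by
          simp only [List.length_cons]; omega)]

-- the indexed match predicate over enumerate equals the zip count
lemma pv_enum_zip_countP (l2 : List Char) (i : Nat) (u : List Char) :
    ∀ (j : Nat),
      (PySem.List.enumerate u ((i : Int) + (j : Nat))).countP
        (fun e => decide (0 ≤ e.1 - (i:Int)) && decide ((e.1 - (i:Int)).toNat < l2.length)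
                    && (l2.getD (e.1 - (i:Int)).toNat ' ' == e.2))
      = (u.zip (l2.drop j)).countP (fun ab => ab.2 == ab.1) := by
  induction u with
  | nil => intro j; simp [PySem.List.enumerate_nil]
  | cons a u ih =>
    intro j
    rw [PySem.List.enumerate_cons, List.countP_cons]
    have hcast : ((i : Int) + (j : Nat)) + 1 = (i : Int) + ((j+1 : Nat) : Int) := by push_cast; ring
    have hd : ((i : Int) + (j : Nat)) - (i : Int) = (j : Int) := by ring
    by_cases hj : j < l2.length
    · rw [List.drop_eq_getElem_cons hj]
      simp only [List.zip_cons_cons, List.countP_cons]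
      rw [hcast, ih (j+1)]
      simp only [hd]
      have : ((j:Int)).toNat = j := by omega
      rw [this, List.getD_eq_getElem l2 ' ' hj]
      simp [hj]
    · rw [List.drop_eq_nil_of_le (by omega), List.zip_nil_right]
      have hz : u.zip (l2.drop (j+1)) = [] := by
        rw [List.drop_eq_nil_of_le (by omega), List.zip_nil_right]
      rw [hcast, ih (j+1), hz]
      simp only [hd, List.countP_nil]
      have hfb : decide (((j:Int)).toNat < l2.length) = false := by simp; omega
      simp [hfb]
      exact fun h => absurd h hj

-- the match table equals the zip match count at every in-range offset
lemma pvB_mtab_getD (l1 l2 : List Char) (k : Nat) (hk : k < l1.length) :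
    (pvB_matches l1 (pvB_positions l2) (List.replicate (l1.length + 1) 0)).getD k 0
      = pvMatchZ l1 l2 k := by
  unfold pvB_matches
  rw [pvB_mtab_sum _ k l1 0 _ (by simp; omega)]
  rw [List.getD_eq_getElem?_getD]
  simp only [List.getElem?_replicate]
  rw [if_pos (by omega)]
  simp only [Option.getD_some, zero_add]
  -- evaluate the per-position count to a 0/1 indicator
  have hper : ∀ e : Int × Char, e ∈ PySem.List.enumerate l1 0 →
      (((pvB_positions l2).getD e.2 []).countP (fun q => decide (q ≤ e.1) && decide (e.1 - q = (k:Int))) : Int)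
      = if (decide (0 ≤ e.1 - (k:Int)) && decide ((e.1 - (k:Int)).toNat < l2.length)
              && (l2.getD (e.1 - (k:Int)).toNat ' ' == e.2)) = true then (1:Int) else 0 := by
    intro e _
    rw [pvB_positions_getD, List.countP_map, List.countP_filter]
    have hcc : (PySem.List.enumerate l2 0).countP
        (fun a => ((fun q => decide (q ≤ e.1) && decide (e.1 - q = (k:Int))) ∘ (fun e => e.1)) a && (a.2 == e.2))
      = (PySem.List.enumerate l2 0).countP (fun x => decide (x.1 = e.1 - (k:Int)) && (x.2 == e.2)) := by
      apply List.countP_congr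
      intro x _
      simp only [Function.comp_apply]
      by_cases h1 : x.1 = e.1 - (k:Int)
      · have hle : x.1 ≤ e.1 := by omega
        have h2 : e.1 - x.1 = (k:Int) := by omega
        simp [h1, h2, hle]
      · have h2 : ¬ (e.1 - x.1 = (k:Int)) := by omega
        simp [h1, h2]
    rw [hcc]
    rw [pv_enum_countP_index (fun ch => ch == e.2) (e.1 - (k:Int)) l2 0]
    simp only [sub_zero]
    by_cases hc1 : 0 ≤ e.1 - (k:Int) ∧ (e.1 - (k:Int)).toNat < l2.length
    · rw [if_pos hc1]
      have d1 : decide (0 ≤ e.1 - (k:Int)) = true := by simp only [decide_eq_true_eq]; omega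
      have d2 : decide ((e.1 - (k:Int)).toNat < l2.length) = true := by simp only [decide_eq_true_eq]; omega
      rw [d1, d2]
      by_cases hc2 : (l2.getD (e.1 - (k:Int)).toNat ' ' == e.2) = true <;> simp [hc2]
    · rw [if_neg hc1]
      have hfalse : (decide (0 ≤ e.1 - (k:Int)) && decide ((e.1 - (k:Int)).toNat < l2.length)
              && (l2.getD (e.1 - (k:Int)).toNat ' ' == e.2)) = false := by
        rcases not_and_or.1 hc1 with h | h
        · have hb : decide (0 ≤ e.1 - (k:Int)) = false := by simp only [decide_eq_false_iff_not]; omega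
          rw [hb, Bool.false_and, Bool.false_and]
        · have hb : decide ((e.1 - (k:Int)).toNat < l2.length) = false := by simp only [decide_eq_false_iff_not]; omega
          rw [hb, Bool.and_false, Bool.false_and]
      rw [hfalse]
      simp
  rw [List.map_congr_left hper]
  rw [PySem.List.sum_map_ite_one_zero]
  -- split the enumeration at k; the first part contributes nothing
  have hsplit : l1 = l1.take k ++ l1.drop k := (List.take_append_drop k l1).symm
  rw [show PySem.List.enumerate l1 0 = PySem.List.enumerate (l1.take k ++ l1.drop k) 0 by rw [← hsplit]]
  rw [PySem.List.enumerate_append, List.countP_append]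
  have hfst : (PySem.List.enumerate (l1.take k) 0).countP
      (fun e => decide (0 ≤ e.1 - (k:Int)) && decide ((e.1 - (k:Int)).toNat < l2.length)
                  && (l2.getD (e.1 - (k:Int)).toNat ' ' == e.2)) = 0 := by
    rw [List.countP_eq_zero]
    intro e he
    rcases (PySem.List.mem_enumerate_iff _ _ _).1 he with ⟨m, hm, rfl⟩
    have hmk : m < k := by
      have := List.length_take_le k l1
      omega
    have : decide (0 ≤ (0 + (m:Int)) - (k:Int)) = false := by simp; omega
    simp [this]
    intro h1
    exact absurd h1 (by omega)
  rw [hfst]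
  have hlen : (l1.take k).length = k := by simp [List.length_take]; omega
  rw [hlen]
  have := pv_enum_zip_countP l2 k (l1.drop k) 0
  simp only [Nat.cast_zero, add_zero, List.drop_zero, zero_add, Nat.cast_ofNat] at this ⊢
  rw [this]
  rfl

-- the two final loops agree step by step
lemma pv_loop_eq (l1 l2 : List Char) (quota : Int) (mt : List Int)
    (hmt : ∀ k : Nat, k < l1.length → mt.getD k 0 = pvMatchZ l1 l2 k) :
    ∀ k : Nat,
      pvA_loop l1 l2 quota (PySem.List.pyRange (k : Int) (l1.length : Int) 1)
      = pvB_find mt (l1.length : Int) (l2.length : Int) quota (PySem.List.pyRange (k : Int) (l1.length : Int) 1) := by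
  intro k
  by_cases hk : l1.length ≤ k
  · rw [PySem.List.pyRange_one_eq_nil (by exact_mod_cast hk)]
    simp [pvA_loop, pvB_find]
  · push_neg at hk
    rw [PySem.List.pyRange_one_cons (by exact_mod_cast hk)]
    simp only [pvA_loop, pvB_find]
    have hslice : PySem.List.slice l1 (some (k : Int)) (some (l1.length : Int)) = l1.drop k := by
      rw [PySem.List.slice_natCast]
      exact List.take_of_length_le (by simp)
    rw [hslice, pvA_edit_eq]
    have hzlen : (((l1.drop k).zip l2).length : Int) = min ((l1.length : Int) - k) (l2.length : Int) := by
      simp [List.length_zip]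
      omega
    have hcond : (((l1.drop k).zip l2).countP (fun ab => !(ab.2 == ab.1)) : Int)
        = min ((l1.length : Int) - k) (l2.length : Int) - PySem.List.pyGetD mt (k : Int) 0 := by
      rw [pv_count_split, hzlen, PySem.List.pyGetD_natCast, hmt k hk]
      rfl
    rw [hcond]
    have hdroplen : (((l1.drop k).length : Nat) : Int) = (l1.length : Int) - k := by
      simp; omega
    split
    · exact hdroplen
    · rw [show ((k : Int) + 1) = ((k + 1 : Nat) : Int) by push_cast; ring]
      exact pv_loop_eq l1 l2 quota mt hmt (k + 1)
termination_by k => l1.length - k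
decreasing_by omega

-- ===== VERDICT (by name: the statement is the Claim_ definition above) =====
theorem check_sequence_subst_py_spec : Claim_equal_check_sequence_subst_py := by
  intro s1 s2 _
  unfold Spec_check_sequence_subst_py check_sequence_subst_py check_sequence_subst_py_alt pvA_quota
  simp only
  have hrep : PySem.List.pyRepeat [(0:Int)] ((s1.toList.length : Int) + 1)
      = List.replicate (s1.toList.length + 1) 0 := by
    rw [PySem.List.pyRepeat_singleton]
    have ht : ((s1.toList.length : Int) + 1).toNat = s1.toList.length + 1 := by omega
    rw [ht]
  rw [hrep]
  exact pv_loop_eq s1.toList s2.toList _ _ (fun k hk => pvB_mtab_getD s1.toList s2.toList k hk) 0
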